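-- pv_equiv track=rewrite | github.com/cicl2018/semeval-2019-task-10 | simple_math/simple_algebra/play.py | score_ans
-- ===== SOURCE A (Python) =====
-- def score_ans(cal_answer, correct_ans):
--     score = 0
--     len_a = len(cal_answer)
--     len_b = len(correct_ans)
--     shorter_len = 0
--     if len_a < len_b:
--         shorter_len = len_a
--     else:
--         shorter_len = len_b
--
--     for i in range(0, shorter_len):
--         char_a = cal_answer[i]
--         char_b = correct_ans[i]
--
--         if char_a != char_b:
--             score += shorter_len - i
--
--     return score
-- ===== SOURCE B (Python) =====
-- def score_ans(cal_answer, correct_ans):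
--     # Prefix-sum reformulation: each mismatch at i contributes (shorter_len - i),
--     # i.e. 1 to every later position's prefix count, so summing a running
--     # mismatch counter over the zipped pair gives the same total.
--     score = 0
--     mismatches = 0
--     for ca, cb in zip(cal_answer, correct_ans):
--         if ca != cb:
--             mismatches += 1
--         score += mismatches
--     return score
-- ===== Notes on version B (the rewrite author's own statement) =====
-- stated objective: alternative
-- what changed: Swapped the order of summation: instead of indexing both strings and adding (shorter_len - i) per mismatch, B iterates over zip(cal_answer, correct_ans) keeping a running mismatch counter and adds that counter at every position; no lengths or indices are computed.
import Mathlib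
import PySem

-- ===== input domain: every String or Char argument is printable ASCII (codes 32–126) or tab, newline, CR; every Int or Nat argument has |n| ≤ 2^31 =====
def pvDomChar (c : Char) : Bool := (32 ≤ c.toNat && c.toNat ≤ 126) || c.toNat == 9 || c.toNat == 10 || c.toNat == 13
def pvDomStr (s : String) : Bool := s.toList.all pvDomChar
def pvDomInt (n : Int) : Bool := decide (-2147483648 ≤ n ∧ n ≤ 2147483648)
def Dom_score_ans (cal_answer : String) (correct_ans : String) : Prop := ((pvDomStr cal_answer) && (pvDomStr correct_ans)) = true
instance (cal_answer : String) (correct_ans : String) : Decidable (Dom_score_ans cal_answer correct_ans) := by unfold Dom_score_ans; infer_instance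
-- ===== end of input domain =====

-- B replaces A's index-based loop (adding shorter_len - i per mismatch) by a running
-- mismatch counter summed over zip(cal_answer, correct_ans); objective: alternative.

-- ===== PORT A =====
def score_ans (cal_answer : String) (correct_ans : String) : Int :=
  let la := cal_answer.toList
  let lb := correct_ans.toList
  let len_a : Int := la.length
  let len_b : Int := lb.length
  let shorter_len : Int := if len_a < len_b then len_a else len_b
  (PySem.List.pyRange 0 shorter_len 1).foldl
    (fun score i =>
      let char_a := PySem.List.pyGetD la i ' '   -- index always in range, so the default is never used
      let char_b := PySem.List.pyGetD lb i ' '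
      if char_a ≠ char_b then score + (shorter_len - i) else score) 0

-- ===== PORT B =====
def score_ans_alt (cal_answer : String) (correct_ans : String) : Int :=
  ((cal_answer.toList.zip correct_ans.toList).foldl
    (fun (acc : Int × Int) pc =>
      let m := if pc.1 ≠ pc.2 then acc.2 + 1 else acc.2
      (acc.1 + m, m)) (0, 0)).1

-- ===== PRECONDITION & SPEC =====
def Spec_score_ans (cal_answer : String) (correct_ans : String) (out : Int) : Prop := out = score_ans_alt cal_answer correct_ans
instance (cal_answer : String) (correct_ans : String) (out : Int) : Decidable (Spec_score_ans cal_answer correct_ans out) := by unfold Spec_score_ans; infer_instance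

-- ===== CLAIM (what is proved, stated in full; the proofs are below) =====
def Claim_equal_score_ans : Prop := ∀ (cal_answer : String) (correct_ans : String), Dom_score_ans cal_answer correct_ans → Spec_score_ans cal_answer correct_ans (score_ans cal_answer correct_ans)

-- ===== LEMMAS AND PROOFS =====

-- Common value both loops compute: each mismatching pair heading a suffix of length k contributes k.
def pvAval : List (Char × Char) → Int
  | [] => 0
  | p :: t => (if p.1 ≠ p.2 then ((t.length : Int) + 1) else 0) + pvAval t

-- B's loop with accumulator (s, m) computes s + m * len + pvAval.
theorem pvB_loop (l : List (Char × Char)) (s m : Int) :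
    (l.foldl (fun (acc : Int × Int) pc =>
      let m := if pc.1 ≠ pc.2 then acc.2 + 1 else acc.2
      (acc.1 + m, m)) (s, m)).1 = s + m * l.length + pvAval l := by
  induction l generalizing s m with
  | nil => simp [pvAval]
  | cons p t ih =>
    rw [List.foldl_cons]
    exact (ih (s + (if p.1 ≠ p.2 then m + 1 else m)) (if p.1 ≠ p.2 then m + 1 else m)).trans (by
      rw [pvAval]
      by_cases h : p.1 ≠ p.2 <;> simp [h] <;> push_cast <;> ring)

-- Peeling the head pair off A's index loop shifts the range and the weights by one.
theorem pvA_shift (c d : Char) (xs ys : List Char) (n : ℕ) (s : ℤ) :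
    (List.range (n+1)).foldl
      (fun score k => if (c::xs).getD k ' ' ≠ (d::ys).getD k ' ' then score + (((n:ℤ)+1) - k) else score) s
    = (List.range n).foldl
      (fun score k => if xs.getD k ' ' ≠ ys.getD k ' ' then score + ((n:ℤ) - k) else score)
      (if c ≠ d then s + ((n:ℤ)+1) else s) := by
  rw [List.range_succ_eq_map]
  simp only [List.foldl_cons, List.foldl_map, List.getD_cons_zero, List.getD_cons_succ,
    Nat.cast_zero, sub_zero, Nat.succ_eq_add_one]
  congr 1
  funext score k
  by_cases h : xs.getD k ' ' ≠ ys.getD k ' ' <;> simp [h] <;> push_cast <;> ring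

-- A's index loop over range(min) computes pvAval of the zip.
theorem pvA_eq_Aval (xs ys : List Char) (s : ℤ) :
    (List.range (min xs.length ys.length)).foldl
      (fun score k => if xs.getD k ' ' ≠ ys.getD k ' '
        then score + ((↑(min xs.length ys.length) : ℤ) - k) else score) s
    = s + pvAval (xs.zip ys) := by
  induction xs generalizing ys s with
  | nil => simp [pvAval]
  | cons c xs ih =>
    cases ys with
    | nil => simp [pvAval]
    | cons d ys =>
      have hm : min (c::xs).length (d::ys).length = min xs.length ys.length + 1 := by
        simp [List.length_cons, Nat.succ_min_succ]
      rw [hm]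
      simp only [Nat.cast_add, Nat.cast_one]
      rw [pvA_shift c d xs ys (min xs.length ys.length) s, ih]
      simp only [List.zip_cons_cons, pvAval, List.length_zip]
      by_cases h : c ≠ d <;> simp [h] <;> push_cast <;> ring

-- ===== VERDICT (by name: the statement is the Claim_ definition above) =====
theorem score_ans_spec : Claim_equal_score_ans := by
  intro a b _
  unfold Spec_score_ans score_ans score_ans_alt
  dsimp only
  have hmin : (if ((a.toList.length : ℤ) < (b.toList.length : ℤ))
        then ((a.toList.length : ℕ) : ℤ) else ((b.toList.length : ℕ) : ℤ))
      = ((min a.toList.length b.toList.length : ℕ) : ℤ) := by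
    split_ifs with h <;> omega
  rw [hmin, PySem.List.pyRange_zero_nat, List.foldl_map]
  simp only [PySem.List.pyGetD_natCast]
  rw [pvA_eq_Aval, pvB_loop]
  simp
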